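-- pv_equiv track=rewrite | github.com/mcmx385/restaurant-city-optimization | helpers/layouts.py | get_all_count
-- ===== SOURCE A (Python) =====
-- def get_all_count(setup):
--     stoves = 0
--     tables = 0
--     areas = 0
--     for row in setup:
--         for item in row:
--             if item == 'T':
--                 tables += 1
--             elif item == 'A':
--                 areas += 1
--             elif item == 'S':
--                 stoves += 1
--     return stoves, tables, areas
-- ===== SOURCE B (Python) =====
-- def get_all_count(setup):
--     def total(ch):
--         return sum(row.count(ch) for row in setup)
--     return total('S'), total('T'), total('A')
-- ===== Notes on version B (the rewrite author's own statement) =====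
-- stated objective: idiomatic
-- what changed: Replaces A's single pass with a per-cell if/elif triple accumulator by three staged per-character passes: for each of 'S','T','A' it sums the built-in row.count over the rows, so no per-cell branching or loop state is kept.
import Mathlib
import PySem

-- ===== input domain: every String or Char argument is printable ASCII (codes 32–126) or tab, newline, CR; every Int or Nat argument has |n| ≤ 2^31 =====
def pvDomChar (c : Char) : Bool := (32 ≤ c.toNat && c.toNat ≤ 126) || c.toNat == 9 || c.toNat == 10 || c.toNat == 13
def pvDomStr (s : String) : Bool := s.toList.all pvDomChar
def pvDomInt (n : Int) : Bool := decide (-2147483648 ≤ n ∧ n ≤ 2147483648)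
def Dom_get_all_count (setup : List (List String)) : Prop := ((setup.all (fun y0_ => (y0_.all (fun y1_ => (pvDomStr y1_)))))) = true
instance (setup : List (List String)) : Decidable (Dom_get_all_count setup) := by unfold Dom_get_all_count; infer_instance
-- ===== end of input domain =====

-- B counts each of 'S','T','A' in three staged per-character passes (summing list.count per row)
-- instead of A's single pass with a per-cell if/elif triple accumulator.
-- ===== PORT A =====
def get_all_count (setup : List (List String)) : Int × Int × Int :=
  setup.foldl (fun acc row =>
    row.foldl (fun acc item =>
      let (stoves, tables, areas) := acc
      if item == "T" then (stoves, tables + 1, areas)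
      else if item == "A" then (stoves, tables, areas + 1)
      else if item == "S" then (stoves + 1, tables, areas)
      else acc) acc) ((0 : Int), (0 : Int), (0 : Int))

-- ===== PORT B =====
-- total ch = sum(row.count(ch) for row in setup)
def pvTotal (setup : List (List String)) (ch : String) : Int :=
  (setup.map (fun row => (row.count ch : Int))).sum

def get_all_count_alt (setup : List (List String)) : Int × Int × Int :=
  (pvTotal setup "S", pvTotal setup "T", pvTotal setup "A")

-- ===== PRECONDITION & SPEC =====
def Spec_get_all_count (setup : List (List String)) (out : Int × Int × Int) : Prop := out = get_all_count_alt setup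
instance (setup : List (List String)) (out : Int × Int × Int) : Decidable (Spec_get_all_count setup out) := by unfold Spec_get_all_count; infer_instance

-- ===== CLAIM (what is proved, stated in full; the proofs are below) =====
def Claim_equal_get_all_count : Prop := ∀ (setup : List (List String)), Dom_get_all_count setup → Spec_get_all_count setup (get_all_count setup)

-- ===== LEMMAS AND PROOFS =====

-- ===== VERDICT (by name: the statement is the Claim_ definition above) =====
lemma inner_count (row : List String) (s t a : Int) :
    row.foldl (fun acc item =>
      let (stoves, tables, areas) := acc
      if item == "T" then (stoves, tables + 1, areas)
      else if item == "A" then (stoves, tables, areas + 1)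
      else if item == "S" then (stoves + 1, tables, areas)
      else acc) (s, t, a)
      = (s + row.count "S", t + row.count "T", a + row.count "A") := by
  induction row generalizing s t a with
  | nil => simp
  | cons x xs ih =>
    simp only [List.foldl_cons, List.count_cons]
    by_cases hT : x = "T" <;> by_cases hA : x = "A" <;> by_cases hS : x = "S" <;>
      simp only [hT, hA, hS, beq_iff_eq, if_true, if_false, reduceIte, ih] <;>
      simp_all [Prod.mk.injEq] <;>
      first
        | exact ⟨by push_cast; ring, by push_cast; ring, by push_cast; ring⟩
        | (push_cast; ring)
        | rfl

lemma outer_count (setup : List (List String)) (s t a : Int) :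
    setup.foldl (fun acc row =>
      row.foldl (fun acc item =>
        let (stoves, tables, areas) := acc
        if item == "T" then (stoves, tables + 1, areas)
        else if item == "A" then (stoves, tables, areas + 1)
        else if item == "S" then (stoves + 1, tables, areas)
        else acc) acc) (s, t, a)
      = (s + pvTotal setup "S", t + pvTotal setup "T", a + pvTotal setup "A") := by
  induction setup generalizing s t a with
  | nil => simp [pvTotal]
  | cons r rs ih =>
    simp only [List.foldl_cons, inner_count, ih, pvTotal, List.map_cons, List.sum_cons,
      Prod.mk.injEq]
    refine ⟨by ring, by ring, by ring⟩

theorem get_all_count_spec : Claim_equal_get_all_count := by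
  intro setup _
  unfold Spec_get_all_count get_all_count get_all_count_alt
  simp only [outer_count, zero_add]
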